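-- pv_equiv track=rewrite | github.com/jonyhossan110/StyleLeaker | core/analyzer.py | _find_sensitive_html_patterns
-- ===== SOURCE A (Python) =====
-- from typing import Any, Dict, List, Optional, Set
--
-- SENSITIVE_PATTERNS = [
--     'admin', 'login', 'logout', 'dashboard', 'panel',
--     'config', 'setup', 'install', 'debug', 'test',
--     'backup', 'secret', 'private', 'internal', 'api',
--     'password', 'token', 'auth', 'user', 'account',
--     'payment', 'billing', 'invoice', 'cart', 'checkout',
--     'upload', 'file', 'download', 'export', 'import',
--     'database', 'db', 'sql', 'query', 'dev', 'staging',
-- ]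
--
-- def _find_sensitive_html_patterns(html_data: Dict[str, Any]) -> Set[str]:
--     found: Set[str] = set()
--     for value in html_data.get('class_names', []) + html_data.get('id_names', []):
--         lower = value.lower()
--         for pattern in SENSITIVE_PATTERNS:
--             if pattern in lower:
--                 found.add(value)
--     return found
-- ===== SOURCE B (Python) =====
-- from typing import Any, Dict, List, Optional, Set
--
-- SENSITIVE_PATTERNS = (
--     'admin login logout dashboard panel config setup install debug test '
--     'backup secret private internal api password token auth user account '
--     'payment billing invoice cart checkout upload file download export import '
--     'database db sql query dev staging'
-- ).split()
--
-- # Hash-set of the patterns and the distinct pattern lengths: instead of scanning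
-- # all 37 patterns per value, slide a window over the value and test each window
-- # of a pattern length for membership in the set.
-- _PATTERN_SET = frozenset(SENSITIVE_PATTERNS)
-- _WINDOW_LENGTHS = sorted({len(p) for p in SENSITIVE_PATTERNS})
--
-- def _find_sensitive_html_patterns(html_data: Dict[str, Any]) -> Set[str]:
--     found: Set[str] = set()
--     for value in html_data.get('class_names', []) + html_data.get('id_names', []):
--         low = value.lower()
--         n = len(low)
--         if any(low[i:i + L] in _PATTERN_SET
--                for i in range(n) for L in _WINDOW_LENGTHS if i + L <= n):
--             found.add(value)
--     return found
-- ===== Notes on version B (the rewrite author's own statement) =====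
-- stated objective: alternative
-- what changed: Instead of scanning all 37 sensitive patterns for each value, B puts the patterns in a hash set once and slides windows of the (seven distinct) pattern lengths over each lowercased value, adding the value iff some window is in the set.
import Mathlib
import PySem

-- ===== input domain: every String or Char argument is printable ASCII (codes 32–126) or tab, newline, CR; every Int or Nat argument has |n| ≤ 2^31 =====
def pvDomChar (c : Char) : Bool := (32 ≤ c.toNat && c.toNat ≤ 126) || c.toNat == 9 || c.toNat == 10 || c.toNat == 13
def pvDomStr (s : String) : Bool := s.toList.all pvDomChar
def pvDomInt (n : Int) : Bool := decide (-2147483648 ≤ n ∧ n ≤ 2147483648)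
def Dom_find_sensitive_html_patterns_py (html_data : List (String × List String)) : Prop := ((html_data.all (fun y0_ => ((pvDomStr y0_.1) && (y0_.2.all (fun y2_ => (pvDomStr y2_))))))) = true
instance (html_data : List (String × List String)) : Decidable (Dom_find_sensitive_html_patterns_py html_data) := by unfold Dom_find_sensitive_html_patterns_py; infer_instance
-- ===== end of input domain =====

-- B replaces A's inner scan over all 37 patterns by hash-set membership tests of the
-- windows of the value whose length is a pattern length (objective: alternative).

-- ===== PORT A =====
def SENSITIVE_PATTERNS : List String := [
  "admin", "login", "logout", "dashboard", "panel",
  "config", "setup", "install", "debug", "test",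
  "backup", "secret", "private", "internal", "api",
  "password", "token", "auth", "user", "account",
  "payment", "billing", "invoice", "cart", "checkout",
  "upload", "file", "download", "export", "import",
  "database", "db", "sql", "query", "dev", "staging"]

def find_sensitive_html_patterns_py (html_data : List (String × List String)) : List String :=
  let values := PySem.Dict.getD (PySem.Dict.mk html_data) "class_names" [] ++
                PySem.Dict.getD (PySem.Dict.mk html_data) "id_names" []
  values.foldl
    (fun found value =>
      let lower := PySem.Str.lower value
      SENSITIVE_PATTERNS.foldl
        (fun found pattern =>
          if PySem.Str.isIn pattern lower then PySem.Set.add found value else found)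
        found)
    PySem.Set.empty

-- ===== PORT B =====
def PATTERN_SET : PySem.Set String := PySem.Set.ofList SENSITIVE_PATTERNS

def WINDOW_LENGTHS : List Int :=
  PySem.List.sorted (PySem.Set.ofList (SENSITIVE_PATTERNS.map (fun p => PySem.Str.len p))) id

def find_sensitive_html_patterns_py_alt (html_data : List (String × List String)) : List String :=
  let values := PySem.Dict.getD (PySem.Dict.mk html_data) "class_names" [] ++
                PySem.Dict.getD (PySem.Dict.mk html_data) "id_names" []
  values.foldl
    (fun found value =>
      let low := PySem.Str.lower value
      let n := PySem.Str.len low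
      if (PySem.List.pyRange 0 n 1).any (fun i =>
           WINDOW_LENGTHS.any (fun L =>
             decide (i + L ≤ n) &&
               PySem.Set.contains PATTERN_SET (PySem.Str.slice low (some i) (some (i + L)))))
      then PySem.Set.add found value else found)
    PySem.Set.empty

-- ===== PRECONDITION & SPEC =====
def Spec_find_sensitive_html_patterns_py (html_data : List (String × List String)) (out : List String) : Prop := out = find_sensitive_html_patterns_py_alt html_data
instance (html_data : List (String × List String)) (out : List String) : Decidable (Spec_find_sensitive_html_patterns_py html_data out) := by unfold Spec_find_sensitive_html_patterns_py; infer_instance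

-- ===== CLAIM (what is proved, stated in full; the proofs are below) =====
def Claim_equal_find_sensitive_html_patterns_py : Prop := ∀ (html_data : List (String × List String)), Dom_find_sensitive_html_patterns_py html_data → Spec_find_sensitive_html_patterns_py html_data (find_sensitive_html_patterns_py html_data)

-- ===== LEMMAS AND PROOFS =====

-- every pattern length occurs in WINDOW_LENGTHS, and all window lengths are ≥ 2
set_option maxRecDepth 8192 in
lemma pat_len_mem : ∀ p ∈ SENSITIVE_PATTERNS, PySem.Str.len p ∈ WINDOW_LENGTHS := by decide

set_option maxRecDepth 8192 in
lemma win_two_le : ∀ L ∈ WINDOW_LENGTHS, (2 : Int) ≤ L := by decide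

lemma setAdd_idem (s : PySem.Set String) (v : String) :
    (s.add v).add v = s.add v := by
  have h : (s.add v).contains v = true :=
    (PySem.Set.contains_iff _ _).2 ((PySem.Set.mem_add s v v).2 (Or.inr rfl))
  show (if (s.add v).contains v then (s.add v) else (s.add v) ++ [v]) = s.add v
  rw [h]
  simp

-- A's inner pattern loop collapses to a single conditional add
lemma foldl_patterns (low v : String) : ∀ (ps : List String) (s : PySem.Set String),
    ps.foldl (fun f p => if PySem.Str.isIn p low then PySem.Set.add f v else f) s
      = if ps.any (fun p => PySem.Str.isIn p low) then PySem.Set.add s v else s := by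
  intro ps
  induction ps with
  | nil => intro s; simp
  | cons h t ih =>
    intro s
    by_cases hc : PySem.Str.isIn h low = true
    · simp only [List.foldl_cons, List.any_cons, hc, if_true, Bool.true_or, ih]
      split
      · exact setAdd_idem s v
      · rfl
    · have hcf : PySem.Str.isIn h low = false := by rwa [Bool.not_eq_true] at hc
      simp only [List.foldl_cons, List.any_cons, hcf, Bool.false_or, Bool.false_eq_true,
        if_false, ih]

-- B's window condition is exactly "some pattern occurs in low"
lemma cond_eq (low : String) :
    ((PySem.List.pyRange 0 (PySem.Str.len low) 1).any (fun i =>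
       WINDOW_LENGTHS.any (fun L =>
         decide (i + L ≤ PySem.Str.len low) &&
           PySem.Set.contains PATTERN_SET (PySem.Str.slice low (some i) (some (i + L))))))
      = SENSITIVE_PATTERNS.any (fun p => PySem.Str.isIn p low) := by
  rw [Bool.eq_iff_iff]
  simp only [List.any_eq_true, Bool.and_eq_true, decide_eq_true_eq]
  constructor
  · rintro ⟨i, hi, L, hL, hle, hc⟩
    have h01 : (0:Int) < 1 := by norm_num
    obtain ⟨hi0, hin, -⟩ := (PySem.List.mem_pyRange_iff_of_pos h01 i).1 hi
    have hL2 : (2:Int) ≤ L := win_two_le L hL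
    -- the slice is a pattern and an infix of low
    have hmem : PySem.Str.slice low (some i) (some (i + L)) ∈ SENSITIVE_PATTERNS := by
      have := (PySem.Set.contains_iff PATTERN_SET _).1 hc
      rwa [PATTERN_SET, PySem.Set.mem_ofList] at this
    refine ⟨_, hmem, ?_⟩
    rw [PySem.Str.isIn_iff_infix]
    have ha : i = ((i.toNat : Nat) : Int) := (Int.toNat_of_nonneg hi0).symm
    have hb : i + L = (((i + L).toNat : Nat) : Int) := (Int.toNat_of_nonneg (by omega)).symm
    rw [PySem.Str.toList_slice, PySem.Chars.slice_eq_listSlice, hb, ha,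
      PySem.List.slice_natCast]
    exact ((List.take_prefix _ _).isInfix).trans ((List.drop_suffix _ _).isInfix)
  · rintro ⟨p, hp, hin⟩
    rw [PySem.Str.isIn_iff_infix] at hin
    obtain ⟨pre, suf, hsplit⟩ := hin
    have hLmem : PySem.Str.len p ∈ WINDOW_LENGTHS := pat_len_mem p hp
    have hL2 : (2:Int) ≤ PySem.Str.len p := win_two_le _ hLmem
    have hlenp : PySem.Str.len p = (p.toList.length : Int) := PySem.Str.len_eq p
    have hlenlow : PySem.Str.len low = (low.toList.length : Int) := PySem.Str.len_eq low
    have hlen : low.toList.length = pre.length + p.toList.length + suf.length := by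
      rw [← hsplit]; simp; omega
    refine ⟨(pre.length : Int), ?_, PySem.Str.len p, hLmem, ?_, ?_⟩
    · rw [PySem.List.mem_pyRange_iff_of_pos (by norm_num)]
      refine ⟨by positivity, ?_, by simp⟩
      rw [hlenlow]
      omega
    · rw [hlenlow, hlenp]; omega
    · -- the slice at (pre.length, pre.length + len p) IS p
      have hslice : PySem.Str.slice low (some (pre.length : Int))
          (some ((pre.length : Int) + PySem.Str.len p)) = p := by
        rw [← String.toList_inj, PySem.Str.toList_slice, PySem.Chars.slice_eq_listSlice]
        have hcast : ((pre.length : Int) + PySem.Str.len p)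
            = (((pre.length + p.toList.length : Nat)) : Int) := by
          rw [hlenp]; push_cast; ring
        rw [hcast, PySem.List.slice_natCast]
        have hdrop : low.toList.drop pre.length = p.toList ++ suf := by
          rw [← hsplit, List.append_assoc, List.drop_left]
        rw [hdrop]
        have : pre.length + p.toList.length - pre.length = p.toList.length := by omega
        rw [this, List.take_left]
      rw [hslice]
      rw [PySem.Set.contains_iff, PATTERN_SET, PySem.Set.mem_ofList]
      exact hp

-- ===== VERDICT (by name: the statement is the Claim_ definition above) =====
theorem find_sensitive_html_patterns_py_spec : Claim_equal_find_sensitive_html_patterns_py := by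
  intro html_data _
  have hstep :
      (fun (found : PySem.Set String) (value : String) =>
        SENSITIVE_PATTERNS.foldl
          (fun found pattern =>
            if PySem.Str.isIn pattern (PySem.Str.lower value) then PySem.Set.add found value
            else found)
          found)
      = (fun (found : PySem.Set String) (value : String) =>
          if (PySem.List.pyRange 0 (PySem.Str.len (PySem.Str.lower value)) 1).any (fun i =>
               WINDOW_LENGTHS.any (fun L =>
                 decide (i + L ≤ PySem.Str.len (PySem.Str.lower value)) &&
                   PySem.Set.contains PATTERN_SET
                     (PySem.Str.slice (PySem.Str.lower value) (some i) (some (i + L)))))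
          then PySem.Set.add found value else found) := by
    funext f v
    rw [foldl_patterns (PySem.Str.lower v) v SENSITIVE_PATTERNS f, cond_eq (PySem.Str.lower v)]
  show List.foldl
      (fun (found : PySem.Set String) (value : String) =>
        SENSITIVE_PATTERNS.foldl
          (fun found pattern =>
            if PySem.Str.isIn pattern (PySem.Str.lower value) then PySem.Set.add found value
            else found)
          found)
      PySem.Set.empty
      (PySem.Dict.getD (PySem.Dict.mk html_data) "class_names" [] ++
        PySem.Dict.getD (PySem.Dict.mk html_data) "id_names" [])
    = List.foldl
      (fun (found : PySem.Set String) (value : String) =>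
          if (PySem.List.pyRange 0 (PySem.Str.len (PySem.Str.lower value)) 1).any (fun i =>
               WINDOW_LENGTHS.any (fun L =>
                 decide (i + L ≤ PySem.Str.len (PySem.Str.lower value)) &&
                   PySem.Set.contains PATTERN_SET
                     (PySem.Str.slice (PySem.Str.lower value) (some i) (some (i + L)))))
          then PySem.Set.add found value else found)
      PySem.Set.empty
      (PySem.Dict.getD (PySem.Dict.mk html_data) "class_names" [] ++
        PySem.Dict.getD (PySem.Dict.mk html_data) "id_names" [])
  rw [hstep]
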